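-- pv_equiv track=rewrite | github.com/DanTreg/WRO2019 | raspberrySupplier/Manufacturer.py | convertModel
-- ===== SOURCE A (Python) =====
-- def convertModel(BallPlaces):
--     manufacturerOne = None
--     manufacturerTwo = None
--     for place in BallPlaces:
--         if place['manufacturerID'] == 1:
--             manufacturerOne = place
--         if place['manufacturerID'] == 2:
--             manufacturerTwo = place
--     return(manufacturerOne, manufacturerTwo)
-- ===== SOURCE B (Python) =====
-- def convertModel(BallPlaces):
--     lastOne = None
--     lastTwo = None
--     for place in reversed(BallPlaces):
--         mid = place['manufacturerID']
--         if lastOne is None and mid == 1: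
--             lastOne = place
--         if lastTwo is None and mid == 2:
--             lastTwo = place
--         if lastOne is not None and lastTwo is not None:
--             break
--     return (lastOne, lastTwo)
-- ===== Notes on version B (the rewrite author's own statement) =====
-- stated objective: alternative
-- what changed: Replaces the forward overwrite loop carrying two mutable slots by a backward scan that keeps the FIRST match for each id and stops early once both are found.
import Mathlib
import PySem

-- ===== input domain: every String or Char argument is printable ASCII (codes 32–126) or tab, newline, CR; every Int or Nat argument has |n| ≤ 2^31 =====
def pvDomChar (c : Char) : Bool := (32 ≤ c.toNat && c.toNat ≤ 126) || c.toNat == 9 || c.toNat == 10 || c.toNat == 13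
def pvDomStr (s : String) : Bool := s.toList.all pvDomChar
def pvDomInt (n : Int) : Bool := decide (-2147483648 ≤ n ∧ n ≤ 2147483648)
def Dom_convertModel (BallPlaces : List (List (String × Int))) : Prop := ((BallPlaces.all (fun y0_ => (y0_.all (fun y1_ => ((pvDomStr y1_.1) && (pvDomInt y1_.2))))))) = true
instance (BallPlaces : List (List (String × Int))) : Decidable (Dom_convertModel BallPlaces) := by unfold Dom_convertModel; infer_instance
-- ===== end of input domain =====

-- B replaces A's forward two-slot overwrite loop by a backward scan that keeps the first
-- match per id and stops early once both are found; objective: alternative.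

-- dict lookup place['manufacturerID'] (first-match on the association list); none = KeyError,
-- excluded by Pre_convertModel, so the getD default is never reached on admitted inputs.
def pvMid (place : List (String × Int)) : Option Int :=
  (place.find? (fun kv => kv.1 == "manufacturerID")).map (·.2)

-- ===== PORT A =====
def convertModel (BallPlaces : List (List (String × Int))) : (Option (List (String × Int))) × (Option (List (String × Int))) :=
  BallPlaces.foldl
    (fun acc place =>
      let acc1 := if (pvMid place).getD 0 = 1 then (some place, acc.2) else acc
      if (pvMid place).getD 0 = 2 then (acc1.1, some place) else acc1)
    (none, none)

-- ===== PORT B =====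
-- Source B's backward loop with early break, as structural recursion over the reversed list.
def convertModelGo : List (List (String × Int)) → Option (List (String × Int)) → Option (List (String × Int)) → (Option (List (String × Int))) × (Option (List (String × Int)))
  | [], lastOne, lastTwo => (lastOne, lastTwo)
  | place :: rest, lastOne, lastTwo =>
    let mid := (pvMid place).getD 0
    let lastOne' := if lastOne = none ∧ mid = 1 then some place else lastOne
    let lastTwo' := if lastTwo = none ∧ mid = 2 then some place else lastTwo
    if lastOne'.isSome ∧ lastTwo'.isSome then (lastOne', lastTwo')
    else convertModelGo rest lastOne' lastTwo'

def convertModel_alt (BallPlaces : List (List (String × Int))) : (Option (List (String × Int))) × (Option (List (String × Int))) :=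
  convertModelGo BallPlaces.reverse none none

-- ===== PRECONDITION & SPEC =====
-- Pre_ excludes exactly the inputs where some element lacks key 'manufacturerID': A raises KeyError there.
def Pre_convertModel (BallPlaces : List (List (String × Int))) : Prop :=
  ∀ place ∈ BallPlaces, (pvMid place).isSome = true
instance (BallPlaces : List (List (String × Int))) : Decidable (Pre_convertModel BallPlaces) := by unfold Pre_convertModel; infer_instance

def pvWitness_convertModel : (List (List (String × Int))) := [[("manufacturerID", 1)], [("manufacturerID", 2)]]

def Spec_convertModel (BallPlaces : List (List (String × Int))) (out : (Option (List (String × Int))) × (Option (List (String × Int)))) : Prop := out = convertModel_alt BallPlaces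
instance (BallPlaces : List (List (String × Int))) (out : (Option (List (String × Int))) × (Option (List (String × Int)))) : Decidable (Spec_convertModel BallPlaces out) := by unfold Spec_convertModel; infer_instance

-- ===== CLAIM (what is proved, stated in full; the proofs are below) =====
def Claim_equal_convertModel : Prop := ∀ (BallPlaces : List (List (String × Int))), Dom_convertModel BallPlaces → Pre_convertModel BallPlaces → Spec_convertModel BallPlaces (convertModel BallPlaces)

-- ===== LEMMAS AND PROOFS =====

-- A's loop from any accumulator computes, in each slot, the last matching element or (failing one) the slot's old value.
theorem convertModel_fold_eq (xs : List (List (String × Int))) (a b : Option (List (String × Int))) :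
    xs.foldl
      (fun acc place =>
        let acc1 := if (pvMid place).getD 0 = 1 then (some place, acc.2) else acc
        if (pvMid place).getD 0 = 2 then (acc1.1, some place) else acc1)
      (a, b)
    = ((xs.filter (fun place => (pvMid place).getD 0 = 1)).getLast?.or a,
       (xs.filter (fun place => (pvMid place).getD 0 = 2)).getLast?.or b) := by
  induction xs generalizing a b with
  | nil => simp
  | cons x xs ih =>
    simp only [List.foldl_cons, List.filter_cons]
    split_ifs with h1 h2 <;>
      simp_all [List.getLast?_cons]

-- B's backward loop (with or without the early break firing) computes, in each slot, the old
-- value or (failing one) the first matching element of the remaining suffix.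
theorem convertModelGo_eq (ys : List (List (String × Int))) (a b : Option (List (String × Int))) :
    convertModelGo ys a b
    = (a.or (ys.find? (fun place => (pvMid place).getD 0 = 1)),
       b.or (ys.find? (fun place => (pvMid place).getD 0 = 2))) := by
  induction ys generalizing a b with
  | nil => simp [convertModelGo]
  | cons y ys ih =>
    simp only [convertModelGo, List.find?_cons]
    cases a <;> cases b <;>
      split_ifs <;>
      simp_all [Option.or]

theorem convertModel_spec' (BallPlaces : List (List (String × Int))) :
    convertModel BallPlaces = convertModel_alt BallPlaces := by
  simp only [convertModel, convertModel_alt, convertModel_fold_eq, convertModelGo_eq,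
    ← List.getLast?_filter, Option.or_none, Option.none_or]

-- ===== VERDICT (by name: the statement is the Claim_ definition above) =====
theorem convertModel_spec : Claim_equal_convertModel := by
  intro BallPlaces _ _
  exact convertModel_spec' BallPlaces
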